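-- pv_equiv track=rewrite | github.com/sterliakov/IT-2022-labs-1-sem | lab12/task6.py | read_lis
-- ===== SOURCE A (Python) =====
-- from operator import itemgetter
--
-- def read_lis(A, d):
--     d = sorted(enumerate(d), key=itemgetter(1))
--     currj, curr = d[-1]
--     ret = [A[currj]]
--     for j, x in reversed(d):
--         if j < currj and x == curr - 1:
--             ret.append(A[j])
--             currj, curr = j, x
--     return ret[::-1]
-- ===== SOURCE B (Python) =====
-- def read_lis(A, d):
--     best = 0
--     for j in range(1, len(d)):
--         if d[j] >= d[best]:
--             best = j
--     curr = d[best]          # IndexError on empty d, same as A's d[-1]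
--     currj = best
--     chain = [A[currj]]
--     while True:
--         idx = -1
--         for j in range(currj):
--             if d[j] == curr - 1:
--                 idx = j
--         if idx < 0:
--             break
--         chain.append(A[idx])
--         currj, curr = idx, curr - 1
--     return chain[::-1]
-- ===== Notes on version B (the rewrite author's own statement) =====
-- stated objective: faster
-- what changed: B drops the sort entirely: a single forward scan finds the last argmax of d (A's sorted()[-1]), and the chain is then rebuilt by repeated direct scans of d for the largest index below currj holding value curr-1, instead of A's one pass over the reversed stable-sorted enumerate list.
import Mathlib
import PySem

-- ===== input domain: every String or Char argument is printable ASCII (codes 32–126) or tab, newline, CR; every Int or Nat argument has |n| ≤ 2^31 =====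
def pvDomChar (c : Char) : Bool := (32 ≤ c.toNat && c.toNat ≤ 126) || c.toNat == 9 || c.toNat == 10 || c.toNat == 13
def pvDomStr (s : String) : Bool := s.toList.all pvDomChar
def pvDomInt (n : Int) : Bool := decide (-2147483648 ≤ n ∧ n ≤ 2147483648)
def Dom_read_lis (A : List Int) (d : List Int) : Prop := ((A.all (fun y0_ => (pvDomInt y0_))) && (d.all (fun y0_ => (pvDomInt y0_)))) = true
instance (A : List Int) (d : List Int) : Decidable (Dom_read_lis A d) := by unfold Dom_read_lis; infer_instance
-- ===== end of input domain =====

-- B skips A's sort: one forward last-argmax scan of d, then repeated predecessor scans rebuild the chain (measurably faster on a timing run's inputs).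

-- ===== PORT A =====
-- literal port of Source A: sort enumerate(d) by value (stable), start at d[-1], one pass over reversed(d)
def read_lis (A : List Int) (d : List Int) : List Int :=
  -- d = sorted(enumerate(d), key=itemgetter(1))
  let ds := PySem.List.sorted (PySem.List.enumerate d) (fun p => p.2) false
  -- currj, curr = d[-1]   (IndexError on empty input: outside Pre_)
  match PySem.List.pyGet? ds (-1) with
  | none => []
  | some cc =>
    -- ret = [A[currj]]    (IndexError when currj ≥ len(A): outside Pre_)
    match PySem.List.pyGet? A cc.1 with
    | none => []
    | some a0 =>
      -- for j, x in reversed(d): if j < currj and x == curr - 1: append; update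
      let st := ds.reverse.foldl
        (fun (st : List Int × Int × Int) (p : Int × Int) =>
          if p.1 < st.2.1 ∧ p.2 = st.2.2 - 1 then
            (st.1 ++ [PySem.List.pyGetD A p.1 0], p.1, p.2)  -- A[j]: j < currj < len(A) under Pre_, in range
          else st)
        (([a0] : List Int), cc.1, cc.2)
      st.1.reverse  -- ret[::-1]

-- ===== PORT B =====
-- inner 'for j in range(currj)' scan of Source B: idx = last j < currj with d[j] == curr - 1, else -1
def read_lis_scan (d : List Int) (currj curr : Int) : Int :=
  (PySem.List.pyRange 0 currj).foldl
    (fun idx j => if PySem.List.pyGetD d j 0 = curr - 1 then j else idx) (-1)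

-- termination fact for the while-loop below (the scan result is -1 or an index below currj)
lemma read_lis_scan_neg_or_lt (d : List Int) (currj curr : Int) :
    read_lis_scan d currj curr = -1 ∨ read_lis_scan d currj curr < currj := by
  unfold read_lis_scan
  have H : ∀ (l : List Int) (a : Int),
      l.foldl (fun idx j => if PySem.List.pyGetD d j 0 = curr - 1 then j else idx) a = a ∨
      l.foldl (fun idx j => if PySem.List.pyGetD d j 0 = curr - 1 then j else idx) a ∈ l := by
    intro l
    induction l with
    | nil => intro a; exact Or.inl rfl
    | cons x xs ih =>
      intro a
      simp only [List.foldl_cons]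
      by_cases hx : PySem.List.pyGetD d x 0 = curr - 1
      · rw [if_pos hx]
        rcases ih x with h | h
        · exact Or.inr (by simp [h])
        · exact Or.inr (List.mem_cons_of_mem _ h)
      · rw [if_neg hx]
        rcases ih a with h | h
        · exact Or.inl h
        · exact Or.inr (List.mem_cons_of_mem _ h)
  rcases H (PySem.List.pyRange 0 currj) (-1) with h | h
  · exact Or.inl h
  · exact Or.inr (PySem.List.mem_pyRange_one.mp h).2

-- the 'while True' loop of Source B
def read_lis_loop (A : List Int) (d : List Int) (chain : List Int) (currj curr : Int) : List Int :=
  if h : read_lis_scan d currj curr < 0 then chain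
  else
    read_lis_loop A d (chain ++ [PySem.List.pyGetD A (read_lis_scan d currj curr) 0])
      (read_lis_scan d currj curr) (curr - 1)
termination_by currj.toNat
decreasing_by
  rcases read_lis_scan_neg_or_lt d currj curr with h1 | h1
  · omega
  · omega

-- literal port of Source B
def read_lis_alt (A : List Int) (d : List Int) : List Int :=
  -- best = 0; for j in range(1, len(d)): if d[j] >= d[best]: best = j
  let best := (PySem.List.pyRange 1 (d.length : Int)).foldl
      (fun best j => if PySem.List.pyGetD d j 0 ≥ PySem.List.pyGetD d best 0 then j else best) 0
  -- curr = d[best]   (IndexError on empty input: outside Pre_)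
  match PySem.List.pyGet? d best with
  | none => []
  | some curr =>
    -- chain = [A[best]]   (IndexError when best ≥ len(A): outside Pre_)
    match PySem.List.pyGet? A best with
    | none => []
    | some a0 => (read_lis_loop A d [a0] best curr).reverse  -- chain[::-1]

-- ===== PRECONDITION & SPEC =====
-- Pre_ admits exactly the inputs on which Python A returns: d nonempty and the last index
-- holding the maximum of d (A's sorted()[-1], which indexes into A) within A's bounds.
def Pre_read_lis (A : List Int) (d : List Int) : Prop :=
  ∃ j, j < d.length ∧ j < A.length ∧
    ∀ k, k < d.length → (d.getD k 0 ≤ d.getD j 0 ∧ (j < k → d.getD k 0 ≠ d.getD j 0))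
instance (A : List Int) (d : List Int) : Decidable (Pre_read_lis A d) := by
  unfold Pre_read_lis; infer_instance

def pvWitness_read_lis : List Int × List Int := ([5, 7], [0, 1])

def Spec_read_lis (A : List Int) (d : List Int) (out : List Int) : Prop := out = read_lis_alt A d
instance (A : List Int) (d : List Int) (out : List Int) : Decidable (Spec_read_lis A d out) := by
  unfold Spec_read_lis; infer_instance

-- ===== CLAIM (what is proved, stated in full; the proofs are below) =====
def Claim_equal_read_lis : Prop :=
  ∀ (A : List Int) (d : List Int), Dom_read_lis A d → Pre_read_lis A d →
    Spec_read_lis A d (read_lis A d)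

-- ===== LEMMAS AND PROOFS =====

-- strict "Python-sort order" on enumerate pairs: smaller value first, ties by smaller index first
def pvLex (p q : Int × Int) : Prop := p.2 < q.2 ∨ (p.2 = q.2 ∧ p.1 < q.1)

-- the step function of A's loop
def pvAstep (A : List Int) (st : List Int × Int × Int) (p : Int × Int) : List Int × Int × Int :=
  if p.1 < st.2.1 ∧ p.2 = st.2.2 - 1 then
    (st.1 ++ [PySem.List.pyGetD A p.1 0], p.1, p.2)
  else st

lemma pv_insertBy_pairwise (x : Int × Int) :
    ∀ (ys : List (Int × Int)), ys.Pairwise pvLex → (∀ y ∈ ys, y.1 < x.1) →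
    (PySem.List.insertBy (fun a b => decide (a.2 < b.2)) x ys).Pairwise pvLex := by
  intro ys
  induction ys with
  | nil => intro _ _; simp [PySem.List.insertBy]
  | cons y ys ih =>
    intro hp hidx
    rw [List.pairwise_cons] at hp
    by_cases hxy : x.2 < y.2
    · rw [show PySem.List.insertBy (fun a b => decide (a.2 < b.2)) x (y :: ys) = x :: y :: ys from by
        simp [PySem.List.insertBy, hxy]]
      refine List.pairwise_cons.mpr ⟨?_, List.pairwise_cons.mpr hp⟩
      intro z hz
      rcases List.mem_cons.mp hz with rfl | hz'
      · exact Or.inl hxy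
      · rcases hp.1 z hz' with h | h
        · exact Or.inl (lt_trans hxy h)
        · exact Or.inl (by omega)
    · rw [show PySem.List.insertBy (fun a b => decide (a.2 < b.2)) x (y :: ys) =
          y :: PySem.List.insertBy (fun a b => decide (a.2 < b.2)) x ys from by
        simp [PySem.List.insertBy, hxy]]
      refine List.pairwise_cons.mpr ⟨?_, ih hp.2 (fun z hz => hidx z (by simp [hz]))⟩
      intro z hz
      rcases (PySem.List.mem_insertBy _ _ _ _).mp hz with rfl | hz'
      · rcases eq_or_lt_of_le (not_lt.mp hxy) with h | h
        · exact Or.inr ⟨h, hidx y (by simp)⟩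
        · exact Or.inl h
      · exact hp.1 z hz'

lemma pv_foldl_insert_pairwise :
    ∀ (xs acc : List (Int × Int)), acc.Pairwise pvLex →
      (∀ y ∈ acc, ∀ x ∈ xs, y.1 < x.1) → xs.Pairwise (fun p q => p.1 < q.1) →
      (xs.foldl (fun acc x => PySem.List.insertBy (fun a b => decide (a.2 < b.2)) x acc) acc).Pairwise pvLex := by
  intro xs
  induction xs with
  | nil => intro acc h _ _; exact h
  | cons x xs ih =>
    intro acc hacc hidx hxs
    rw [List.pairwise_cons] at hxs
    simp only [List.foldl_cons]
    refine ih _ (pv_insertBy_pairwise x acc hacc (fun y hy => hidx y hy x (by simp))) ?_ hxs.2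
    intro y hy z hz
    rcases (PySem.List.mem_insertBy _ _ _ _).mp hy with rfl | hy'
    · exact hxs.1 z hz
    · exact hidx y hy' z (by simp [hz])

lemma pv_sorted_pairwise (d : List Int) :
    (PySem.List.sorted (PySem.List.enumerate d) (fun p => p.2) false).Pairwise pvLex := by
  rw [PySem.List.sorted_eq_foldl_insertBy]
  exact pv_foldl_insert_pairwise (PySem.List.enumerate d) [] (List.Pairwise.nil)
    (by intro y hy; simp at hy) (PySem.List.pairwise_lt_enumerate d 0)

lemma pv_mem_enum (d : List Int) (p : Int × Int) :
    p ∈ PySem.List.enumerate d ↔ ∃ k, ∃ h : k < d.length, p = ((k : Int), d[k]) := by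
  rw [PySem.List.mem_enumerate_iff]
  constructor
  · rintro ⟨k, h, rfl⟩; exact ⟨k, h, by simp⟩
  · rintro ⟨k, h, rfl⟩; exact ⟨k, h, by simp⟩

lemma pv_enum_mem_of (d : List Int) (r : Int) (h0 : 0 ≤ r) (h1 : r < (d.length : Int)) :
    (r, PySem.List.pyGetD d r 0) ∈ PySem.List.enumerate d := by
  rw [pv_mem_enum]
  refine ⟨r.toNat, by omega, ?_⟩
  rw [PySem.List.pyGetD_eq_getElem d 0 h0 h1]
  have : ((r.toNat : Nat) : Int) = r := by omega
  rw [this]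

lemma pv_getD_nat (d : List Int) (k : Nat) (hk : k < d.length) :
    PySem.List.pyGetD d ((k : Nat) : Int) 0 = d[k] := by
  rw [PySem.List.pyGetD_natCast, List.getD_eq_getElem d 0 hk]


lemma pv_scan_aux (d : List Int) (cv : Int) :
    ∀ (n : Nat),
      ((PySem.List.pyRange 0 (n : Int)).foldl
          (fun idx j => if PySem.List.pyGetD d j 0 = cv - 1 then j else idx) (-1) = -1 ∧
        ∀ j : Int, 0 ≤ j → j < (n : Int) → PySem.List.pyGetD d j 0 ≠ cv - 1) ∨
      (0 ≤ (PySem.List.pyRange 0 (n : Int)).foldl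
          (fun idx j => if PySem.List.pyGetD d j 0 = cv - 1 then j else idx) (-1) ∧
        (PySem.List.pyRange 0 (n : Int)).foldl
          (fun idx j => if PySem.List.pyGetD d j 0 = cv - 1 then j else idx) (-1) < (n : Int) ∧
        PySem.List.pyGetD d ((PySem.List.pyRange 0 (n : Int)).foldl
          (fun idx j => if PySem.List.pyGetD d j 0 = cv - 1 then j else idx) (-1)) 0 = cv - 1 ∧
        ∀ j : Int, (PySem.List.pyRange 0 (n : Int)).foldl
          (fun idx j => if PySem.List.pyGetD d j 0 = cv - 1 then j else idx) (-1) < j →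
          j < (n : Int) → PySem.List.pyGetD d j 0 ≠ cv - 1) := by
  intro n
  induction n with
  | zero =>
    left
    constructor
    · simp [PySem.List.pyRange_one_eq_nil]
    · intro j h1 h2; omega
  | succ n ih =>
    have hsplit : PySem.List.pyRange 0 ((n + 1 : Nat) : Int) = PySem.List.pyRange 0 (n : Int) ++ [(n : Int)] := by
      push_cast
      exact PySem.List.pyRange_one_succ_right (by omega)
    rw [hsplit, List.foldl_append]
    simp only [List.foldl_cons, List.foldl_nil]
    by_cases hn : PySem.List.pyGetD d (n : Int) 0 = cv - 1
    · rw [if_pos hn]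
      right
      refine ⟨by omega, by push_cast; omega, hn, ?_⟩
      intro j h1 h2
      push_cast at h2
      omega
    · rw [if_neg hn]
      rcases ih with ⟨h1, h2⟩ | ⟨h1, h2, h3, h4⟩
      · left
        refine ⟨h1, ?_⟩
        intro j hj1 hj2
        push_cast at hj2
        by_cases hje : j = (n : Int)
        · rw [hje]; exact hn
        · exact h2 j hj1 (by omega)
      · right
        refine ⟨h1, by push_cast; omega, h3, ?_⟩
        intro j hj1 hj2
        push_cast at hj2
        by_cases hje : j = (n : Int)
        · rw [hje]; exact hn
        · exact h4 j hj1 (by omega)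


lemma pv_scan_spec (d : List Int) (cj cv : Int) (h0 : 0 ≤ cj) :
    (read_lis_scan d cj cv = -1 ∧ ∀ j : Int, 0 ≤ j → j < cj → PySem.List.pyGetD d j 0 ≠ cv - 1) ∨
    (0 ≤ read_lis_scan d cj cv ∧ read_lis_scan d cj cv < cj ∧
      PySem.List.pyGetD d (read_lis_scan d cj cv) 0 = cv - 1 ∧
      ∀ j : Int, read_lis_scan d cj cv < j → j < cj → PySem.List.pyGetD d j 0 ≠ cv - 1) := by
  have hc : cj = ((cj.toNat : Nat) : Int) := by omega
  rw [show read_lis_scan d cj cv = (PySem.List.pyRange 0 cj).foldl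
      (fun idx j => if PySem.List.pyGetD d j 0 = cv - 1 then j else idx) (-1) from rfl]
  rw [hc]
  exact pv_scan_aux d cv cj.toNat

lemma pv_best_aux (d : List Int) :
    ∀ (m : Nat), 1 ≤ m →
      (0 ≤ (PySem.List.pyRange 1 (m : Int)).foldl
          (fun best j => if PySem.List.pyGetD d j 0 ≥ PySem.List.pyGetD d best 0 then j else best) 0 ∧
        (PySem.List.pyRange 1 (m : Int)).foldl
          (fun best j => if PySem.List.pyGetD d j 0 ≥ PySem.List.pyGetD d best 0 then j else best) 0 < (m : Int) ∧
        ∀ j : Int, 0 ≤ j → j < (m : Int) →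
          (PySem.List.pyGetD d j 0 ≤ PySem.List.pyGetD d
              ((PySem.List.pyRange 1 (m : Int)).foldl
                (fun best j => if PySem.List.pyGetD d j 0 ≥ PySem.List.pyGetD d best 0 then j else best) 0) 0 ∧
            ((PySem.List.pyRange 1 (m : Int)).foldl
                (fun best j => if PySem.List.pyGetD d j 0 ≥ PySem.List.pyGetD d best 0 then j else best) 0 < j →
              PySem.List.pyGetD d j 0 ≠ PySem.List.pyGetD d
                ((PySem.List.pyRange 1 (m : Int)).foldl
                  (fun best j => if PySem.List.pyGetD d j 0 ≥ PySem.List.pyGetD d best 0 then j else best) 0) 0))) := by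
  intro m
  induction m with
  | zero => intro h; omega
  | succ n ih =>
    intro _
    by_cases hn : n = 0
    · subst hn
      rw [show ((0 + 1 : Nat) : Int) = 1 by norm_num, PySem.List.pyRange_one_eq_nil (by omega)]
      simp only [List.foldl_nil]
      refine ⟨le_refl 0, by norm_num, ?_⟩
      intro j h1 h2
      have : j = 0 := by omega
      subst this
      exact ⟨le_refl _, by omega⟩
    · have hsplit : PySem.List.pyRange 1 ((n + 1 : Nat) : Int) = PySem.List.pyRange 1 (n : Int) ++ [(n : Int)] := by
        push_cast
        exact PySem.List.pyRange_one_succ_right (by omega)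
      rw [hsplit, List.foldl_append]
      simp only [List.foldl_cons, List.foldl_nil]
      obtain ⟨ih1, ih2, ih3⟩ := ih (by omega)
      by_cases hge : PySem.List.pyGetD d (n : Int) 0 ≥ PySem.List.pyGetD d
          ((PySem.List.pyRange 1 (n : Int)).foldl
            (fun best j => if PySem.List.pyGetD d j 0 ≥ PySem.List.pyGetD d best 0 then j else best) 0) 0
      · rw [if_pos hge]
        refine ⟨by omega, by push_cast; omega, ?_⟩
        intro j h1 h2
        push_cast at h2
        by_cases hje : j = (n : Int)
        · subst hje; exact ⟨le_refl _, by omega⟩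
        · have hj' := ih3 j h1 (by omega)
          exact ⟨le_trans hj'.1 hge, by omega⟩
      · rw [if_neg hge]
        push_cast at hge
        refine ⟨ih1, by push_cast; omega, ?_⟩
        intro j h1 h2
        push_cast at h2
        by_cases hje : j = (n : Int)
        · subst hje
          exact ⟨by omega, fun _ => by omega⟩
        · exact ih3 j h1 (by omega)

lemma pv_best_spec (d : List Int) (hd : d ≠ []) :
    0 ≤ (PySem.List.pyRange 1 (d.length : Int)).foldl
        (fun best j => if PySem.List.pyGetD d j 0 ≥ PySem.List.pyGetD d best 0 then j else best) 0 ∧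
    (PySem.List.pyRange 1 (d.length : Int)).foldl
        (fun best j => if PySem.List.pyGetD d j 0 ≥ PySem.List.pyGetD d best 0 then j else best) 0 < (d.length : Int) ∧
    ∀ j : Int, 0 ≤ j → j < (d.length : Int) →
      (PySem.List.pyGetD d j 0 ≤ PySem.List.pyGetD d
          ((PySem.List.pyRange 1 (d.length : Int)).foldl
            (fun best j => if PySem.List.pyGetD d j 0 ≥ PySem.List.pyGetD d best 0 then j else best) 0) 0 ∧
        ((PySem.List.pyRange 1 (d.length : Int)).foldl
            (fun best j => if PySem.List.pyGetD d j 0 ≥ PySem.List.pyGetD d best 0 then j else best) 0 < j →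
          PySem.List.pyGetD d j 0 ≠ PySem.List.pyGetD d
            ((PySem.List.pyRange 1 (d.length : Int)).foldl
              (fun best j => if PySem.List.pyGetD d j 0 ≥ PySem.List.pyGetD d best 0 then j else best) 0) 0)) :=
  pv_best_aux d d.length (by cases d with | nil => simp at hd | cons a l => simp)

lemma pv_foldl_nomatch (A : List Int) :
    ∀ (t : List (Int × Int)) (st : List Int × Int × Int),
      (∀ p ∈ t, ¬(p.1 < st.2.1 ∧ p.2 = st.2.2 - 1)) → t.foldl (pvAstep A) st = st := by
  intro t
  induction t with
  | nil => intro st _; rfl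
  | cons h t' ih =>
    intro st hno
    simp only [List.foldl_cons]
    rw [show pvAstep A st h = st from by unfold pvAstep; rw [if_neg (hno h (by simp))]]
    exact ih st (fun p hp => hno p (by simp [hp]))

lemma pv_main (A d : List Int) :
    ∀ (t : List (Int × Int)) (ret : List Int) (cj cv : Int),
      t.Pairwise (fun p q => pvLex q p) →
      (∀ p ∈ t, p ∈ PySem.List.enumerate d) →
      (∀ p ∈ PySem.List.enumerate d, p.2 = cv - 1 → p.1 < cj → p ∈ t) →
      (∀ p ∈ PySem.List.enumerate d, p.2 < cv - 1 → p ∈ t) →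
      0 ≤ cj → cj ≤ (d.length : Int) →
      (t.foldl (pvAstep A) (ret, cj, cv)).1 = read_lis_loop A d ret cj cv := by
  intro t
  induction t with
  | nil =>
    intro ret cj cv _ _ h3 _ h0 hlen
    simp only [List.foldl_nil]
    have hscan : read_lis_scan d cj cv < 0 := by
      rcases pv_scan_spec d cj cv h0 with ⟨he, _⟩ | ⟨hr0, hrlt, hrval, _⟩
      · omega
      · exfalso
        have hmem := pv_enum_mem_of d (read_lis_scan d cj cv) hr0 (by omega)
        have := h3 _ hmem hrval hrlt
        simp at this
    rw [read_lis_loop, dif_pos hscan]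
  | cons h t' ih =>
    intro ret cj cv hpw hsub h3 h4 h0 hlen
    rw [List.pairwise_cons] at hpw
    obtain ⟨k, hk, hhk⟩ := (pv_mem_enum d h).mp (hsub h (by simp))
    have hh1 : 0 ≤ h.1 := by rw [hhk]; positivity
    have hhval : PySem.List.pyGetD d h.1 0 = h.2 := by
      rw [hhk]; exact pv_getD_nat d k hk
    simp only [List.foldl_cons]
    by_cases hm : h.1 < cj ∧ h.2 = cv - 1
    · -- h is the next chain element
      rw [show pvAstep A (ret, cj, cv) h = (ret ++ [PySem.List.pyGetD A h.1 0], h.1, h.2) from by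
        unfold pvAstep; rw [if_pos hm]]
      have hscan : read_lis_scan d cj cv = h.1 := by
        rcases pv_scan_spec d cj cv h0 with ⟨_, hnone⟩ | ⟨hr0, hrlt, hrval, hrmax⟩
        · exact absurd (hhval.trans hm.2) (hnone h.1 hh1 hm.1)
        · rcases lt_trichotomy (read_lis_scan d cj cv) h.1 with hc | hc | hc
          · exact absurd hhval (by rw [hm.2]; exact hrmax h.1 hc hm.1)
          · exact hc
          · exfalso
            have hmem := pv_enum_mem_of d (read_lis_scan d cj cv) hr0 (by omega)
            have hint := h3 _ hmem hrval hrlt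
            rcases List.mem_cons.mp hint with hcase | hcase
            · have e1 := congrArg Prod.fst hcase
              simp only at e1
              omega
            · have hlex := hpw.1 _ hcase
              unfold pvLex at hlex
              simp only at hlex
              rw [hrval, ← hm.2] at hlex
              omega
      have hloop : read_lis_loop A d ret cj cv =
          read_lis_loop A d (ret ++ [PySem.List.pyGetD A h.1 0]) h.1 (cv - 1) := by
        rw [read_lis_loop, dif_neg (by omega : ¬ read_lis_scan d cj cv < 0), hscan]
      rw [hloop, ← hm.2]
      refine ih _ h.1 h.2 hpw.2 (fun p hp => hsub p (by simp [hp])) ?_ ?_ hh1 (by omega)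
      · intro p hp hval hidx
        have hint : p ∈ h :: t' := h4 p hp (by omega)
        rcases List.mem_cons.mp hint with hcase | hcase
        · exfalso; rw [hcase] at hval; omega
        · exact hcase
      · intro p hp hval
        have hint : p ∈ h :: t' := h4 p hp (by omega)
        rcases List.mem_cons.mp hint with hcase | hcase
        · exfalso; rw [hcase] at hval; omega
        · exact hcase
    · -- h is skipped
      rw [show pvAstep A (ret, cj, cv) h = (ret, cj, cv) from by unfold pvAstep; rw [if_neg hm]]
      by_cases hv : h.2 < cv - 1
      · -- all remaining values are below curr - 1: both sides stop
        rw [pv_foldl_nomatch A t' (ret, cj, cv) ?_]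
        · have hscan : read_lis_scan d cj cv < 0 := by
            rcases pv_scan_spec d cj cv h0 with ⟨he, _⟩ | ⟨hr0, hrlt, hrval, _⟩
            · omega
            · exfalso
              have hmem := pv_enum_mem_of d (read_lis_scan d cj cv) hr0 (by omega)
              have hint := h3 _ hmem hrval hrlt
              rcases List.mem_cons.mp hint with hcase | hcase
              · have e2 := congrArg Prod.snd hcase
                simp only at e2
                omega
              · have hlex := hpw.1 _ hcase
                unfold pvLex at hlex
                simp only at hlex
                rw [hrval] at hlex
                omega
          rw [read_lis_loop, dif_pos hscan]
        · intro p hp hcontra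
          have hlex := hpw.1 p hp
          unfold pvLex at hlex
          simp only at hlex hcontra
          omega
      · -- h.2 ≥ curr - 1 but no match: skip on both sides
        refine ih ret cj cv hpw.2 (fun p hp => hsub p (by simp [hp])) ?_ ?_ h0 hlen
        · intro p hp hval hidx
          rcases List.mem_cons.mp (h3 p hp hval hidx) with hcase | hcase
          · exfalso
            apply hm
            rw [← hcase]
            exact ⟨hidx, hval⟩
          · exact hcase
        · intro p hp hval
          rcases List.mem_cons.mp (h4 p hp hval) with hcase | hcase
          · exfalso; rw [hcase] at hval; omega
          · exact hcase

lemma pv_read_lis_eq (A d : List Int) (cc : Int × Int) (a0 : Int)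
    (h1 : PySem.List.pyGet? (PySem.List.sorted (PySem.List.enumerate d) (fun p => p.2) false) (-1) = some cc)
    (h2 : PySem.List.pyGet? A cc.1 = some a0) :
    read_lis A d = ((PySem.List.sorted (PySem.List.enumerate d) (fun p => p.2) false).reverse.foldl
      (pvAstep A) (([a0] : List Int), cc.1, cc.2)).1.reverse := by
  unfold read_lis
  simp only [h1, h2]
  rfl

lemma pv_read_lis_alt_eq (A d : List Int) (curr a0 : Int)
    (h1 : PySem.List.pyGet? d ((PySem.List.pyRange 1 (d.length : Int)).foldl
      (fun best j => if PySem.List.pyGetD d j 0 ≥ PySem.List.pyGetD d best 0 then j else best) 0) = some curr)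
    (h2 : PySem.List.pyGet? A ((PySem.List.pyRange 1 (d.length : Int)).foldl
      (fun best j => if PySem.List.pyGetD d j 0 ≥ PySem.List.pyGetD d best 0 then j else best) 0) = some a0) :
    read_lis_alt A d = (read_lis_loop A d [a0]
      ((PySem.List.pyRange 1 (d.length : Int)).foldl
        (fun best j => if PySem.List.pyGetD d j 0 ≥ PySem.List.pyGetD d best 0 then j else best) 0) curr).reverse := by
  unfold read_lis_alt
  simp only [h1, h2]

-- ===== VERDICT (by name: the statement is the Claim_ definition above) =====
theorem read_lis_spec : Claim_equal_read_lis := by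
  intro A d _ hpre
  unfold Spec_read_lis
  obtain ⟨j₀, hj₀d, hj₀A, hmax⟩ := hpre
  have hd : d ≠ [] := by intro h; rw [h] at hj₀d; simp at hj₀d
  have hene : PySem.List.enumerate d ≠ [] := by
    cases d with
    | nil => exact absurd rfl hd
    | cons x xs => rw [PySem.List.enumerate_cons]; simp
  have hsne : PySem.List.sorted (PySem.List.enumerate d) (fun p => p.2) false ≠ [] := by
    rw [ne_eq, PySem.List.sorted_eq_nil_iff]; exact hene
  set s := PySem.List.sorted (PySem.List.enumerate d) (fun p => p.2) false with hs
  -- the last element of the sorted list is the pair (j₀, d[j₀]) described by Pre_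
  have hmaxI : ∀ j : Int, 0 ≤ j → j < (d.length : Int) →
      (PySem.List.pyGetD d j 0 ≤ PySem.List.pyGetD d ((j₀ : Nat) : Int) 0 ∧
        (((j₀ : Nat) : Int) < j → PySem.List.pyGetD d j 0 ≠ PySem.List.pyGetD d ((j₀ : Nat) : Int) 0)) := by
    intro j hj1 hj2
    have hm := hmax j.toNat (by omega)
    have ej : PySem.List.pyGetD d j 0 = d.getD j.toNat 0 := by
      rw [PySem.List.pyGetD_eq_getElem d 0 hj1 hj2, List.getD_eq_getElem d 0 (by omega)]
    have ejj : PySem.List.pyGetD d ((j₀ : Nat) : Int) 0 = d.getD j₀ 0 := by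
      rw [PySem.List.pyGetD_natCast]
    constructor
    · rw [ej, ejj]; exact hm.1
    · intro hlt; rw [ej, ejj]; exact hm.2 (by omega)
  have hlast : s.getLast hsne = (((j₀ : Nat) : Int), d[j₀]) := by
    have hlastmem : s.getLast hsne ∈ s := List.getLast_mem hsne
    obtain ⟨k₁, hk₁, hlast_eq⟩ := (pv_mem_enum d _).mp ((PySem.List.mem_sorted _ _ _ _).mp hlastmem)
    by_contra hne
    -- (j₀, d[j₀]) sits strictly before the last element, so pvLex (j₀, d[j₀]) last
    have hpj_s : (((j₀ : Nat) : Int), d[j₀]) ∈ s := by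
      rw [PySem.List.mem_sorted]
      exact (pv_mem_enum d _).mpr ⟨j₀, hj₀d, rfl⟩
    have hdecomp := List.dropLast_append_getLast hsne
    have hpj_drop : (((j₀ : Nat) : Int), d[j₀]) ∈ s.dropLast := by
      rcases List.mem_append.mp (by rw [hdecomp]; exact hpj_s) with h | h
      · exact h
      · exact absurd (List.mem_singleton.mp h).symm hne
    have spw := pv_sorted_pairwise d
    rw [← hs, ← hdecomp] at spw
    have hcross := (List.pairwise_append.mp spw).2.2
    have hlex1 : pvLex (((j₀ : Nat) : Int), d[j₀]) (s.getLast hsne) :=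
      hcross _ hpj_drop _ (List.mem_singleton.mpr rfl)
    -- and by Pre_'s maximality, pvLex last (j₀, d[j₀])
    have hk₁j : k₁ ≠ j₀ := by
      intro h
      apply hne
      rw [hlast_eq]
      subst h
      rfl
    have hm₁ := hmax k₁ hk₁
    rw [List.getD_eq_getElem d 0 hk₁, List.getD_eq_getElem d 0 hj₀d] at hm₁
    have hlex2 : pvLex (s.getLast hsne) (((j₀ : Nat) : Int), d[j₀]) := by
      rw [hlast_eq]
      rcases eq_or_lt_of_le hm₁.1 with he | hlt
      · right
        refine ⟨he, ?_⟩
        have : ¬ j₀ < k₁ := fun hc => hm₁.2 hc he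
        have : k₁ < j₀ := by omega
        show ((k₁ : Nat) : Int) < ((j₀ : Nat) : Int)
        exact_mod_cast this
      · exact Or.inl hlt
    rw [hlast_eq] at hlex1
    unfold pvLex at hlex1 hlex2
    simp only at hlex1 hlex2
    omega
  -- A's two indexings succeed and yield (j₀, d[j₀]) and A[j₀]
  have hA1 : PySem.List.pyGet? s (-1) = some (((j₀ : Nat) : Int), d[j₀]) := by
    rw [PySem.List.pyGet?_neg_one, List.getLast?_eq_some_getLast hsne, hlast]
  have hA2 : PySem.List.pyGet? A ((j₀ : Nat) : Int) = some A[j₀] := by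
    rw [PySem.List.pyGet?_natCast, List.getElem?_eq_getElem hj₀A]
  -- B's scanned argmax is the same index j₀
  obtain ⟨hb0, hblt, hbmax⟩ := pv_best_spec d hd
  set b := (PySem.List.pyRange 1 (d.length : Int)).foldl
      (fun best j => if PySem.List.pyGetD d j 0 ≥ PySem.List.pyGetD d best 0 then j else best) 0 with hb
  have hbeq : b = ((j₀ : Nat) : Int) := by
    by_contra hne
    have hj₀I : 0 ≤ ((j₀ : Nat) : Int) := by positivity
    have hj₀lt : ((j₀ : Nat) : Int) < (d.length : Int) := by exact_mod_cast hj₀d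
    have h1' := (hbmax _ hj₀I hj₀lt).1
    have h2' := (hmaxI b hb0 hblt).1
    have heq : PySem.List.pyGetD d b 0 = PySem.List.pyGetD d ((j₀ : Nat) : Int) 0 := le_antisymm h2' h1'
    rcases lt_or_gt_of_ne hne with hc | hc
    · exact (hbmax _ hj₀I hj₀lt).2 hc heq.symm
    · exact (hmaxI b hb0 hblt).2 hc heq
  have hB1 : PySem.List.pyGet? d b = some d[j₀] := by
    rw [hbeq, PySem.List.pyGet?_natCast, List.getElem?_eq_getElem hj₀d]
  have hB2 : PySem.List.pyGet? A b = some A[j₀] := by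
    rw [hbeq]; exact hA2
  rw [pv_read_lis_eq A d _ _ hA1 hA2, pv_read_lis_alt_eq A d _ _ hB1 hB2, ← hb, hbeq]
  congr 1
  exact pv_main A d s.reverse [A[j₀]] ((j₀ : Nat) : Int) d[j₀]
    (List.pairwise_reverse.mpr (pv_sorted_pairwise d))
    (fun p hp => (PySem.List.mem_sorted _ _ _ _).mp (List.mem_reverse.mp hp))
    (fun p hp _ _ => List.mem_reverse.mpr ((PySem.List.mem_sorted _ _ _ _).mpr hp))
    (fun p hp _ => List.mem_reverse.mpr ((PySem.List.mem_sorted _ _ _ _).mpr hp))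
    (by positivity) (by exact_mod_cast le_of_lt hj₀d)
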